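-- pv_equiv track=rewrite | github.com/Shepherd-ITSec/sentinel_ebpf | scripts/replay_lidds.py | _strip_lidds_strace_numeric_suffix
-- ===== SOURCE A (Python) =====
-- def _strip_lidds_strace_numeric_suffix(value: str) -> str:
--   """Strip any parenthesized suffix from a numeric token.
--
--   Examples:
--     - ``-1(EPERM)`` → ``-1``
--     - ``74(MAP_PRIVATE|MAP_ANONYMOUS)`` → ``74``
--     - ``36(<4u>127.0.0.1:1->127.0.0.2:2)`` → ``36``
--   """
--   raw = (value or "").strip()
--   if not raw:
--     return raw
--   j = 0
--   if raw[0] == "-":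
--     j = 1
--   start = j
--   while j < len(raw) and raw[j].isdigit():
--     j += 1
--   if j > start and j < len(raw) and raw[j] == "(":
--     return raw[:j]
--   return raw
-- ===== SOURCE B (Python) =====
-- def _strip_lidds_strace_numeric_suffix(value: str) -> str:
--   """Same task, decomposed as: find the first '(' boundary, then validate the prefix."""
--   raw = (value or "").strip()
--   idx = raw.find("(")
--   if idx == -1:
--     return raw
--   prefix = raw[:idx]
--   body = prefix[1:] if prefix.startswith("-") else prefix
--   return prefix if body and body.isdigit() else raw
-- ===== Notes on version B (the rewrite author's own statement) =====
-- stated objective: simpler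
-- what changed: B replaces A's inline index scan (optional '-', digit run, then check the next char is '(') by a find-then-validate decomposition: locate the first '(', slice the prefix, and validate it as an optional-minus digit token.
import Mathlib
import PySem

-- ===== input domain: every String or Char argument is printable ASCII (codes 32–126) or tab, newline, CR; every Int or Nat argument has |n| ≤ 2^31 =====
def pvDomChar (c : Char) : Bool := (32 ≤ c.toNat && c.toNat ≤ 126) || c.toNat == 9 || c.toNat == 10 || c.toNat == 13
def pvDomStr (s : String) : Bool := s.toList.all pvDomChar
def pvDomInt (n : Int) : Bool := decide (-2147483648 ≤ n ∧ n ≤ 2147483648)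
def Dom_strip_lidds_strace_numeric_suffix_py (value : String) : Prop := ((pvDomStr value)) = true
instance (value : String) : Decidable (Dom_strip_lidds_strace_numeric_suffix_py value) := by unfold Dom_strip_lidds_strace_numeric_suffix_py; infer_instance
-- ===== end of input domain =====

-- B strips the parenthesized suffix by a find-then-validate decomposition instead of A's inline index scan; objective: simpler.

-- ===== PORT A =====
-- the while loop 'while j < len(raw) and raw[j].isdigit(): j += 1' of A
def pvALoop (cs : List Char) (j : Nat) : Nat :=
  if h : j < cs.length ∧ PySem.Chars.isdigit (cs.getD j ' ') = true then pvALoop cs (j + 1) else j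
termination_by cs.length - j
decreasing_by omega


-- A's body after 'raw = (value or "").strip()', on the code points of raw
def pvACore (cs : List Char) : List Char :=
  if cs.isEmpty then cs
  else
    let j0 : Nat := if cs.getD 0 ' ' = '-' then 1 else 0
    let j := pvALoop cs j0
    if j0 < j ∧ j < cs.length ∧ cs.getD j ' ' = '(' then cs.take j else cs


def strip_lidds_strace_numeric_suffix_py (value : String) : String :=
  String.ofList (pvACore (PySem.Str.strip value).toList)

-- ===== PORT B =====
-- B's body after the strip: find the first '(', slice the prefix, validate it
def pvBCore (cs : List Char) : List Char :=
  let idx := PySem.Chars.find cs ['(']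
  if idx = -1 then cs
  else
    let pre := PySem.List.slice cs none (some idx)
    let body := if PySem.Chars.startswith pre ['-'] then PySem.List.slice pre (some 1) none else pre
    if ¬ body.isEmpty ∧ PySem.Chars.strIsdigit body = true then pre else cs


def strip_lidds_strace_numeric_suffix_py_alt (value : String) : String :=
  String.ofList (pvBCore (PySem.Str.strip value).toList)

-- ===== PRECONDITION & SPEC =====
def Spec_strip_lidds_strace_numeric_suffix_py (value : String) (out : String) : Prop := out = strip_lidds_strace_numeric_suffix_py_alt value
instance (value : String) (out : String) : Decidable (Spec_strip_lidds_strace_numeric_suffix_py value out) := by unfold Spec_strip_lidds_strace_numeric_suffix_py; infer_instance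

-- ===== CLAIM (what is proved, stated in full; the proofs are below) =====
def Claim_equal_strip_lidds_strace_numeric_suffix_py : Prop := ∀ (value : String), Dom_strip_lidds_strace_numeric_suffix_py value → Spec_strip_lidds_strace_numeric_suffix_py value (strip_lidds_strace_numeric_suffix_py value)

-- ===== LEMMAS AND PROOFS =====
theorem pvALoop_spec (cs : List Char) (j : Nat) (hj : j ≤ cs.length) :
    j ≤ pvALoop cs j ∧ pvALoop cs j ≤ cs.length ∧
    (∀ k, j ≤ k → k < pvALoop cs j → PySem.Chars.isdigit (cs.getD k ' ') = true) ∧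
    (pvALoop cs j = cs.length ∨ (pvALoop cs j < cs.length ∧ PySem.Chars.isdigit (cs.getD (pvALoop cs j) ' ') = false)) := by
  fun_induction pvALoop cs j with
  | case1 j h ih =>
    obtain ⟨h1, h2, h3, h4⟩ := ih (by omega)
    refine ⟨by omega, h2, ?_, h4⟩
    intro k hk1 hk2
    rcases Nat.eq_or_lt_of_le hk1 with rfl | hlt
    · exact h.2
    · exact h3 k hlt hk2
  | case2 j h =>
    refine ⟨le_refl _, hj, by omega, ?_⟩
    rcases Nat.eq_or_lt_of_le hj with rfl | hlt
    · exact Or.inl rfl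
    · exact Or.inr ⟨hlt, by simpa [hlt] using h⟩

theorem single_prefix_drop (cs : List Char) (c : Char) (i : Nat) :
    [c] <+: cs.drop i ↔ (i < cs.length ∧ cs.getD i ' ' = c) := by
  constructor
  · rintro ⟨t, ht⟩
    have hlen : i < cs.length := by
      have := congrArg List.length ht
      simp at this; omega
    refine ⟨hlen, ?_⟩
    have hd : cs.drop i = c :: t := ht.symm
    have h0 : cs[i]'hlen = c := by
      have := List.drop_eq_getElem_cons hlen
      rw [hd] at this
      exact (List.cons.injEq _ _ _ _ ▸ this).1.symm
    rw [List.getD_eq_getElem cs ' ' hlen, h0]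
  · rintro ⟨hlen, hc⟩
    rw [List.getD_eq_getElem cs ' ' hlen] at hc
    rw [List.drop_eq_getElem_cons hlen]
    exact ⟨cs.drop (i + 1), by rw [hc]; rfl⟩

theorem find_single_eq (cs : List Char) (c : Char) (i : Nat)
    (hi : i < cs.length) (hc : cs.getD i ' ' = c) (hmin : ∀ k, k < i → cs.getD k ' ' ≠ c) :
    PySem.Chars.find cs [c] = (i : Int) := by
  have hpre : [c] <+: cs.drop i := (single_prefix_drop cs c i).mpr ⟨hi, hc⟩
  have hinf : [c] <:+: cs := hpre.isInfix.trans (List.drop_suffix i cs).isInfix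
  have h0 : 0 ≤ PySem.Chars.find cs [c] := (PySem.Chars.find_nonneg_iff cs [c]).mpr hinf
  obtain ⟨hp, hm⟩ := PySem.Chars.find_spec h0
  set n := (PySem.Chars.find cs [c]).toNat with hn
  obtain ⟨hn1, hn2⟩ := (single_prefix_drop cs c n).mp hp
  have : n = i := by
    by_contra hne
    rcases Nat.lt_or_ge n i with h | h
    · exact hmin n h hn2
    · exact hm i (by omega) hpre
  omega

theorem mem_drop_take (cs : List Char) (d k i : Nat) (hd : d ≤ k) (hk : k < i) (hi : i ≤ cs.length) :
    cs.getD k ' ' ∈ (cs.take i).drop d := by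
  have hklen : k < cs.length := by omega
  rw [List.getD_eq_getElem cs ' ' hklen]
  have : ((cs.take i).drop d)[k - d]'(by simp; omega) = cs[k] := by
    rw [List.getElem_drop, List.getElem_take]
    congr 1; omega
  exact this ▸ List.getElem_mem _


theorem getD_take (cs : List Char) (i k : Nat) (hk : k < i) (hi : k < cs.length) :
    (cs.take i).getD k ' ' = cs.getD k ' ' := by
  rw [List.getD_eq_getElem _ ' ' (by simp; omega), List.getD_eq_getElem cs ' ' hi, List.getElem_take]

theorem startswith_minus_iff (p : List Char) :
    PySem.Chars.startswith p ['-'] = true ↔ (0 < p.length ∧ p.getD 0 ' ' = '-') := by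
  rw [PySem.Chars.startswith_iff]
  have := single_prefix_drop p '-' 0
  simpa using this

theorem all_drop_take (cs : List Char) (d i : Nat) (hi : i ≤ cs.length)
    (h : ∀ k, d ≤ k → k < i → PySem.Chars.isdigit (cs.getD k ' ') = true) :
    ((cs.take i).drop d).all PySem.Chars.isdigit = true := by
  rw [List.all_eq_true]
  intro x hx
  obtain ⟨n, hn, hnx⟩ := List.getElem_of_mem hx
  have hlen : d + n < i := by simp at hn; omega
  have : ((cs.take i).drop d)[n]'hn = cs.getD (d + n) ' ' := by
    rw [List.getElem_drop, List.getElem_take, List.getD_eq_getElem cs ' ' (by omega)]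
  rw [← hnx, this]
  exact h (d + n) (by omega) hlen

theorem strIsdigit_false_of_mem (body : List Char) (x : Char) (hx : x ∈ body)
    (hnd : PySem.Chars.isdigit x = false) : PySem.Chars.strIsdigit body = false := by
  unfold PySem.Chars.strIsdigit
  rw [Bool.and_eq_false_iff]
  right
  rw [List.all_eq_false]
  exact ⟨x, hx, by simp [hnd]⟩

theorem pvCore_eq (cs : List Char) : pvACore cs = pvBCore cs := by
  by_cases hnil : cs = []
  · subst hnil; decide
  · have hlen0 : 0 < cs.length := List.length_pos_of_ne_nil hnil
    have hne : cs.isEmpty = false := by simpa using hnil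
    simp only [pvACore, pvBCore, hne, Bool.false_eq_true, if_false]
    set j0 : Nat := (if cs.getD 0 ' ' = '-' then 1 else 0) with hj0def
    have hj0le : j0 ≤ cs.length := by rw [hj0def]; split <;> omega
    set j := pvALoop cs j0 with hjdef
    obtain ⟨hle, hjlen, hdig, hexit⟩ := pvALoop_spec cs j0 hj0le
    rw [← hjdef] at hle hjlen hdig hexit
    have hj0one : 0 < j0 → (j0 = 1 ∧ cs.getD 0 ' ' = '-') := by
      rw [hj0def]; split
      · rename_i hh; exact fun _ => ⟨rfl, hh⟩
      · intro h; exact absurd h (by omega)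
    have hnotpar : ∀ k, k < j → cs.getD k ' ' ≠ '(' := by
      intro k hk hcontra
      by_cases hk0 : k < j0
      · obtain ⟨h1, h2⟩ := hj0one (by omega)
        have : k = 0 := by omega
        rw [this, h2] at hcontra; exact absurd hcontra (by decide)
      · have := hdig k (by omega) hk
        rw [hcontra] at this; exact absurd this (by decide)
    by_cases hA : j0 < j ∧ j < cs.length ∧ cs.getD j ' ' = '('
    · -- A strips: find must be exactly j and the prefix validates
      obtain ⟨hA1, hA2, hA3⟩ := hA
      have hfind : PySem.Chars.find cs ['('] = (j : Int) :=
        find_single_eq cs '(' j hA2 hA3 hnotpar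
      rw [if_pos ⟨hA1, hA2, hA3⟩, hfind, if_neg (by omega : ¬(j : Int) = -1),
        PySem.List.slice_to_natCast]
      by_cases hm : cs.getD 0 ' ' = '-'
      · have hj01 : j0 = 1 := by rw [hj0def, if_pos hm]
        have hsw : PySem.Chars.startswith (cs.take j) ['-'] = true := by
          rw [startswith_minus_iff]
          exact ⟨by simp; omega, by rw [getD_take cs j 0 (by omega) (by omega)]; exact hm⟩
        rw [hsw, if_pos (show (true = true) from rfl), PySem.List.slice_from_one]
        rw [if_pos]
        constructor
        · simp [← List.length_pos_iff]; omega
        · unfold PySem.Chars.strIsdigit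
          rw [Bool.and_eq_true]
          refine ⟨by simp [← List.length_pos_iff]; omega, ?_⟩
          have := all_drop_take cs 1 j (by omega) (fun k hk1 hk2 => hdig k (by omega) hk2)
          simpa [← List.drop_one] using this
      · have hj00 : j0 = 0 := by rw [hj0def, if_neg hm]
        have hsw : PySem.Chars.startswith (cs.take j) ['-'] = false := by
          rw [Bool.eq_false_iff, Ne, startswith_minus_iff]
          rintro ⟨h1, h2⟩
          rw [getD_take cs j 0 (by omega) (by omega)] at h2
          exact hm h2
        rw [hsw, if_neg (show ¬(false = true) from by simp), if_pos]
        constructor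
        · simp [← List.length_pos_iff]; omega
        · unfold PySem.Chars.strIsdigit
          rw [Bool.and_eq_true]
          refine ⟨by simp [← List.length_pos_iff]; omega, ?_⟩
          have := all_drop_take cs 0 j (by omega) (fun k hk1 hk2 => hdig k (by omega) hk2)
          simpa using this
    · -- A keeps raw: either no '(' or the prefix fails validation
      rw [if_neg hA]
      by_cases hf : PySem.Chars.find cs ['('] = -1
      · rw [if_pos hf]
      · have h0 : 0 ≤ PySem.Chars.find cs ['('] := by
          have := PySem.Chars.neg_one_le_find cs ['(']
          omega
        obtain ⟨hp, hmfirst⟩ := PySem.Chars.find_spec h0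
        set i := (PySem.Chars.find cs ['(']).toNat with hidef
        have hif : PySem.Chars.find cs ['('] = (i : Int) := (Int.toNat_of_nonneg h0).symm
        obtain ⟨hilen, hich⟩ := (single_prefix_drop cs '(' i).mp hp
        have hij : j ≤ i := by
          by_contra hcon
          exact hnotpar i (by omega) hich
        have hjlt : j < cs.length := by omega
        have hjnd : PySem.Chars.isdigit (cs.getD j ' ') = false := by
          rcases hexit with h | h
          · omega
          · exact h.2
        rw [if_neg hf, hif, PySem.List.slice_to_natCast, if_neg]
        rintro ⟨hbne, hbdig⟩
        by_cases hieqj : i = j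
        · -- A's guard failed with '(' right after the scan: scan found no digits, j = j0
          have hj0j : j0 = j := by
            rcases Nat.lt_or_ge j0 j with h | h
            · exact absurd ⟨h, by omega, by rw [← hieqj]; exact hich⟩ hA
            · omega
          rcases Nat.eq_zero_or_pos j0 with hz | hpos
          · -- prefix is empty
            have hemp : cs.take i = [] := by rw [hieqj, ← hj0j, hz]; simp
            rw [hemp] at hbne
            revert hbne
            decide
          · -- prefix is exactly "-"
            obtain ⟨h1, hm⟩ := hj0one hpos
            have htake : cs.take i = ['-'] := by
              rw [hieqj, ← hj0j, h1]
              have : cs.take 1 = [cs[0]'hlen0] := by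
                rw [List.take_one]
                cases cs with
                | nil => exact absurd rfl hnil
                | cons a l => simp
              rw [this, ← List.getD_eq_getElem cs ' ' hlen0, hm]
            rw [htake] at hbne hbdig
            revert hbne hbdig
            decide
        · -- the prefix contains the non-digit cs[j]
          have hjlti : j < i := by omega
          have hmem : cs.getD j ' ' ∈ (if PySem.Chars.startswith (cs.take i) ['-'] = true
              then PySem.List.slice (cs.take i) (some 1) none else cs.take i) := by
            split
            · rename_i hsw
              obtain ⟨hswl, hsw0⟩ := (startswith_minus_iff (cs.take i)).mp hsw
              rw [getD_take cs i 0 (by omega) (by omega)] at hsw0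
              have hj0pos : 0 < j0 := by
                by_contra hz
                have hz0 : j0 = 0 := by omega
                rw [hj0def] at hz0
                split at hz0
                · omega
                · rename_i hmm; exact hmm hsw0
              rw [PySem.List.slice_from_one, ← List.drop_one]
              exact mem_drop_take cs 1 j i (by omega) hjlti (by omega)
            · have := mem_drop_take cs 0 j i (by omega) hjlti (by omega)
              simpa using this
          have hfalse := strIsdigit_false_of_mem _ _ hmem hjnd
          rw [hfalse] at hbdig
          exact Bool.false_ne_true hbdig

-- ===== VERDICT (by name: the statement is the Claim_ definition above) =====
theorem strip_lidds_strace_numeric_suffix_py_spec : Claim_equal_strip_lidds_strace_numeric_suffix_py := by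
  intro value _
  show _ = _
  unfold strip_lidds_strace_numeric_suffix_py strip_lidds_strace_numeric_suffix_py_alt
  rw [pvCore_eq]
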